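-- pv_equiv track=rewrite | github.com/WillCanfield01/news-aggregator | app/utils/preview.py | _keep_first_what_happened
-- ===== SOURCE A (Python) =====
-- def _keep_first_what_happened(text: str) -> str:
--     """
--     If "What happened" exists, keep that paragraph and drop the rest;
--     otherwise return original text.
--     """
--     lower = text.lower()
--     idx = lower.find("what happened")
--     if idx == -1:
--         return text
--     snippet = text[idx:]
--     # stop at next "what to do" or next heading-ish cue
--     stop_tokens = ["what to do", "why it matters", "key takeaways", "remediation"]
--     stop_idx = len(snippet)
--     low_snip = snippet.lower()
--     for tok in stop_tokens:
--         pos = low_snip.find(tok)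
--         if pos != -1 and pos < stop_idx:
--             stop_idx = pos
--     return snippet[:stop_idx].strip()
-- ===== SOURCE B (Python) =====
-- def _keep_first_what_happened(text: str) -> str:
--     """
--     If "What happened" exists, keep that paragraph and drop the rest;
--     otherwise return original text.
--     """
--     low = text.lower()
--     idx = low.find("what happened")
--     if idx == -1:
--         return text
--     low_snip = low[idx:]
--     tokens = ("what to do", "why it matters", "key takeaways", "remediation")
--     # single left-to-right scan: stop at the first position where ANY stop
--     # token begins, instead of four independent full scans + running min
--     for pos in range(len(low_snip)):
--         if any(low_snip.startswith(tok, pos) for tok in tokens):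
--             return text[idx:idx + pos].strip()
--     return text[idx:].strip()
-- ===== Notes on version B (the rewrite author's own statement) =====
-- stated objective: alternative
-- what changed: Replaces four independent find() scans with a running minimum by one combined left-to-right scan over the snippet that stops at the first position where any stop token begins (early return), also reusing the already-lowercased text instead of lowercasing the snippet again.
import Mathlib
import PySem

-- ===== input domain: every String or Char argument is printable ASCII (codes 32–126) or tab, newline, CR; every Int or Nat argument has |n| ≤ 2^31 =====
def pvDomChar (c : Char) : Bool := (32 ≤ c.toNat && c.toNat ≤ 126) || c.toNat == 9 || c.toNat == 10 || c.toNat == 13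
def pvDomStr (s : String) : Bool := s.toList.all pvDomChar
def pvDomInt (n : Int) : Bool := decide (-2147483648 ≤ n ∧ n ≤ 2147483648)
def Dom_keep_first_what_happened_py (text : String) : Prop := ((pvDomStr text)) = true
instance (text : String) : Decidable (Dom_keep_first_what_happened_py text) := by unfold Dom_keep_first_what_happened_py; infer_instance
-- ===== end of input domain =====

-- B replaces A's four independent find() scans + running minimum by ONE combined
-- left-to-right scan stopping at the first position where any stop token begins
-- (objective: alternative decomposition, same asymptotic cost).

-- ===== PORT A =====
-- the for-loop over stop_tokens updating stop_idx, as a fold (A-side helper)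
def pvStep (low_snip : List Char) (acc : Int) (tok : List Char) : Int :=
  let pos := PySem.Chars.find low_snip tok
  if pos ≠ -1 ∧ pos < acc then pos else acc

def keep_first_what_happened_py (text : String) : String :=
  let lower := PySem.Chars.lower text.toList
  let idx := PySem.Chars.find lower "what happened".toList
  if idx = -1 then text
  else
    let snippet := PySem.Chars.slice text.toList (some idx) none
    let stop_tokens := ["what to do".toList, "why it matters".toList,
                        "key takeaways".toList, "remediation".toList]
    let low_snip := PySem.Chars.lower snippet
    let stop_idx := stop_tokens.foldl (pvStep low_snip) (PySem.Chars.len snippet)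
    String.ofList (PySem.Chars.strip (PySem.Chars.slice snippet none (some stop_idx)))

-- ===== PORT B =====
-- 'any(low_snip.startswith(tok, pos) for tok in tokens)' (B-side helper)
def pvMatch (toks : List (List Char)) (rest : List Char) : Bool :=
  toks.any (fun t => PySem.Chars.startswith rest t)

-- 'for pos in range(len(low_snip)): if any(...): return pos' (early-return scan);
-- rest is low_snip[pos:] so startswith(tok, pos) is startswith on rest
def pvScan (toks : List (List Char)) (rest : List Char) (pos : Nat) : Option Nat :=
  match rest with
  | [] => none
  | _ :: tl => if pvMatch toks rest then some pos else pvScan toks tl (pos + 1)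

def keep_first_what_happened_py_alt (text : String) : String :=
  let low := PySem.Chars.lower text.toList
  let idx := PySem.Chars.find low "what happened".toList
  if idx = -1 then text
  else
    let low_snip := PySem.Chars.slice low (some idx) none
    let toks := ["what to do".toList, "why it matters".toList,
                 "key takeaways".toList, "remediation".toList]
    match pvScan toks low_snip 0 with
    | some pos =>
        String.ofList (PySem.Chars.strip (PySem.Chars.slice text.toList (some idx) (some (idx + (pos : Int)))))
    | none =>
        String.ofList (PySem.Chars.strip (PySem.Chars.slice text.toList (some idx) none))

-- ===== PRECONDITION & SPEC =====
def Spec_keep_first_what_happened_py (text : String) (out : String) : Prop := out = keep_first_what_happened_py_alt text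
instance (text : String) (out : String) : Decidable (Spec_keep_first_what_happened_py text out) := by unfold Spec_keep_first_what_happened_py; infer_instance

-- ===== CLAIM (what is proved, stated in full; the proofs are below) =====
def Claim_equal_keep_first_what_happened_py : Prop := ∀ (text : String), Dom_keep_first_what_happened_py text → Spec_keep_first_what_happened_py text (keep_first_what_happened_py text)

-- ===== LEMMAS AND PROOFS =====

-- find at position 0: first match position, with minimality
theorem pv_find_spec (S t : List Char) (h : PySem.Chars.find S t ≠ -1) :
    0 ≤ PySem.Chars.find S t ∧ t <+: S.drop (PySem.Chars.find S t).toNat ∧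
      ∀ i : Nat, i < (PySem.Chars.find S t).toNat → ¬ t <+: S.drop i := by
  have h0 : PySem.Chars.findFrom S t ((0 : Nat) : Int) none = PySem.Chars.find S t := by
    simp [PySem.Chars.findFrom_zero S t]
  have := PySem.Chars.findFrom_natCast_spec S t 0 (Nat.zero_le _) (by rw [h0]; exact h)
  rw [h0] at this
  exact ⟨by exact_mod_cast this.1, this.2.1, fun i hi => this.2.2 i (Nat.zero_le _) hi⟩

theorem pv_find_no_match (S t : List Char) (h : PySem.Chars.find S t = -1) :
    ∀ i : Nat, ¬ t <+: S.drop i := by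
  intro i hp
  have : t <:+: S := hp.isInfix.trans (List.drop_suffix i S).isInfix
  exact ((PySem.Chars.find_eq_neg_one_iff S t).mp h) this

theorem pvScan_none_iff (toks : List (List Char)) (rest : List Char) (pos : Nat) :
    pvScan toks rest pos = none ↔ ∀ k, k < rest.length → pvMatch toks (rest.drop k) = false := by
  induction rest generalizing pos with
  | nil => simp [pvScan]
  | cons x tl ih =>
    by_cases hm : pvMatch toks (x :: tl) = true
    · simp only [pvScan]
      rw [if_pos hm]
      constructor
      · intro h; simp at h
      · intro h
        have h0 := h 0 (Nat.succ_pos _)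
        simp only [List.drop_zero] at h0
        simp [h0] at hm
    · simp only [pvScan]
      rw [if_neg hm]
      rw [ih (pos + 1)]
      constructor
      · intro h k hk
        cases k with
        | zero => simpa using (Bool.not_eq_true _).mp hm
        | succ j => exact h j (by simpa using Nat.lt_of_succ_lt_succ hk)
      · intro h k hk
        exact h (k + 1) (by simpa using Nat.succ_lt_succ hk)

theorem pvScan_some_iff (toks : List (List Char)) (rest : List Char) (pos q : Nat) :
    pvScan toks rest pos = some q ↔
      ∃ k, q = pos + k ∧ k < rest.length ∧ pvMatch toks (rest.drop k) = true ∧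
        ∀ j, j < k → pvMatch toks (rest.drop j) = false := by
  induction rest generalizing pos q with
  | nil => simp [pvScan]
  | cons x tl ih =>
    by_cases hm : pvMatch toks (x :: tl) = true
    · simp only [pvScan]
      rw [if_pos hm]
      constructor
      · rintro h; injection h with h
        exact ⟨0, h.symm, by simp, by simpa using hm, by omega⟩
      · rintro ⟨k, hq, _, _, hmin⟩
        cases k with
        | zero => simp [hq]
        | succ j =>
          have := hmin 0 (Nat.succ_pos j)
          simp only [List.drop_zero] at this
          simp [this] at hm
    · simp only [pvScan]
      rw [if_neg hm]
      rw [ih (pos + 1) q]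
      constructor
      · rintro ⟨k, hq, hk, hmk, hmin⟩
        refine ⟨k + 1, by omega, by simpa using Nat.succ_lt_succ hk, by simpa using hmk, ?_⟩
        intro j hj
        cases j with
        | zero => simpa using (Bool.not_eq_true _).mp hm
        | succ i => simpa using hmin i (Nat.lt_of_succ_lt_succ hj)
      · rintro ⟨k, hq, hk, hmk, hmin⟩
        cases k with
        | zero => exact absurd (by simpa using hmk) hm
        | succ i =>
          refine ⟨i, by omega, by simpa using Nat.lt_of_succ_lt_succ hk, by simpa using hmk, ?_⟩
          intro j hj
          simpa using hmin (j + 1) (Nat.succ_lt_succ hj)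

theorem pvFold_spec (S : List Char) (ts : List (List Char)) (init : Int) :
    (ts.foldl (pvStep S) init = init ∨
      ∃ t ∈ ts, ts.foldl (pvStep S) init = PySem.Chars.find S t ∧ PySem.Chars.find S t ≠ -1) ∧
    ts.foldl (pvStep S) init ≤ init ∧
    (∀ t ∈ ts, PySem.Chars.find S t ≠ -1 → ts.foldl (pvStep S) init ≤ PySem.Chars.find S t) := by
  induction ts generalizing init with
  | nil => simp
  | cons t ts ih =>
    simp only [List.foldl_cons]
    by_cases h : PySem.Chars.find S t ≠ -1 ∧ PySem.Chars.find S t < init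
    · have hstep : pvStep S init t = PySem.Chars.find S t := by
        simp [pvStep, h]
      rw [hstep]
      have ih' := ih (PySem.Chars.find S t)
      refine ⟨?_, le_trans ih'.2.1 (le_of_lt h.2), ?_⟩
      · rcases ih'.1 with h1 | ⟨u, hu, he, hne⟩
        · exact Or.inr ⟨t, List.mem_cons_self, h1, h.1⟩
        · exact Or.inr ⟨u, List.mem_cons_of_mem _ hu, he, hne⟩
      · intro u hu hne
        rcases List.mem_cons.mp hu with rfl | hu
        · exact ih'.2.1
        · exact ih'.2.2 u hu hne
    · have hstep : pvStep S init t = init := by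
        simp only [pvStep]
        rw [if_neg h]
      rw [hstep]
      have ih' := ih init
      refine ⟨?_, ih'.2.1, ?_⟩
      · rcases ih'.1 with h1 | ⟨u, hu, he, hne⟩
        · exact Or.inl h1
        · exact Or.inr ⟨u, List.mem_cons_of_mem _ hu, he, hne⟩
      · intro u hu hne
        rcases List.mem_cons.mp hu with rfl | hu
        · rcases not_and_or.mp h with hc | hc
          · exact absurd hne hc
          · exact le_trans ih'.2.1 (le_of_not_gt hc)
        · exact ih'.2.2 u hu hne

-- pvMatch in terms of prefixes
theorem pvMatch_iff (toks : List (List Char)) (xs : List Char) :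
    pvMatch toks xs = true ↔ ∃ t ∈ toks, t <+: xs := by
  simp [pvMatch, PySem.Chars.startswith_iff]

-- the core equality: A's min-over-finds equals B's first combined match position
theorem pv_core (S : List Char) (toks : List (List Char)) (htoks : ∀ t ∈ toks, t ≠ []) :
    (∀ q : Nat, pvScan toks S 0 = some q →
        toks.foldl (pvStep S) (S.length : Int) = (q : Int)) ∧
    (pvScan toks S 0 = none → toks.foldl (pvStep S) (S.length : Int) = (S.length : Int)) := by
  have hfold := pvFold_spec S toks (S.length : Int)
  constructor
  · intro q hq
    rcases (pvScan_some_iff toks S 0 q).mp hq with ⟨k, hk0, hklen, hmk, hmin⟩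
    have hkq : k = q := by omega
    subst hkq
    rcases (pvMatch_iff toks _).mp hmk with ⟨t, ht, hpre⟩
    have hfind_ne : PySem.Chars.find S t ≠ -1 := by
      intro hnone
      exact pv_find_no_match S t hnone k hpre
    have hspec := pv_find_spec S t hfind_ne
    have hft_le : (PySem.Chars.find S t).toNat ≤ k := by
      by_contra hlt
      exact hspec.2.2 k (by omega) hpre
    have hr_le : toks.foldl (pvStep S) (S.length : Int) ≤ (k : Int) := by
      have h2 := hfold.2.2 t ht hfind_ne
      have h0 : (0:Int) ≤ PySem.Chars.find S t := hspec.1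
      omega
    rcases hfold.1 with hinit | ⟨u, hu, he, hne⟩
    · rw [hinit] at hr_le ⊢
      omega
    · have huspec := pv_find_spec S u hne
      have hr0 : (0:Int) ≤ toks.foldl (pvStep S) (S.length : Int) := he ▸ huspec.1
      have hpre_u : u <+: S.drop (toks.foldl (pvStep S) (S.length : Int)).toNat := by
        rw [he]; exact huspec.2.1
      have hk_le : k ≤ (toks.foldl (pvStep S) (S.length : Int)).toNat := by
        by_contra hlt
        have hfalse := hmin (toks.foldl (pvStep S) (S.length : Int)).toNat (by omega)
        have hmatch : pvMatch toks (S.drop (toks.foldl (pvStep S) (S.length : Int)).toNat) = true :=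
          (pvMatch_iff toks _).mpr ⟨u, hu, hpre_u⟩
        simp [hfalse] at hmatch
      omega
  · intro hnone
    have hall := (pvScan_none_iff toks S 0).mp hnone
    rcases hfold.1 with hinit | ⟨u, hu, he, hne⟩
    · exact hinit
    · exfalso
      have huspec := pv_find_spec S u hne
      have hlen : (PySem.Chars.find S u).toNat < S.length := by
        by_contra hge
        have hdrop : S.drop (PySem.Chars.find S u).toNat = [] :=
          List.drop_eq_nil_of_le (by omega)
        rw [hdrop] at huspec
        exact htoks u hu (List.prefix_nil.mp huspec.2.1)
      have hmatch : pvMatch toks (S.drop (PySem.Chars.find S u).toNat) = true :=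
        (pvMatch_iff toks _).mpr ⟨u, hu, huspec.2.1⟩
      simp [hall _ hlen] at hmatch

-- ===== VERDICT (by name: the statement is the Claim_ definition above) =====
theorem keep_first_what_happened_py_spec : Claim_equal_keep_first_what_happened_py := by
  unfold Claim_equal_keep_first_what_happened_py
  intro text _
  unfold Spec_keep_first_what_happened_py
  simp only [keep_first_what_happened_py, keep_first_what_happened_py_alt]
  split_ifs with hidx
  · rfl
  · set idx := PySem.Chars.find (PySem.Chars.lower text.toList) "what happened".toList with hidxdef
    have hidx0 : 0 ≤ idx := (pv_find_spec _ _ hidx).1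
    have hsnip : PySem.Chars.slice text.toList (some idx) none =
        List.drop idx.toNat text.toList := by
      rw [PySem.Chars.slice_eq_listSlice]
      exact PySem.List.slice_from _ hidx0
    have hlow : PySem.Chars.slice (PySem.Chars.lower text.toList) (some idx) none =
        PySem.Chars.lower (List.drop idx.toNat text.toList) := by
      rw [PySem.Chars.slice_eq_listSlice, PySem.List.slice_from _ hidx0]
      simp [PySem.Chars.lower, List.map_drop]
    rw [hsnip, hlow]
    set S := PySem.Chars.lower (List.drop idx.toNat text.toList) with hS
    have hSlen : S.length = (List.drop idx.toNat text.toList).length := by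
      simp [hS, PySem.Chars.lower]
    have hcore := pv_core S
      ["what to do".toList, "why it matters".toList, "key takeaways".toList, "remediation".toList]
      (by decide)
    cases hscan : pvScan
        ["what to do".toList, "why it matters".toList, "key takeaways".toList, "remediation".toList]
        S 0 with
    | none =>
      have hfold := hcore.2 hscan
      simp only [PySem.Chars.len_eq]
      rw [← hSlen]
      rw [hfold]
      have hA : PySem.Chars.slice (List.drop idx.toNat text.toList) none (some ((S.length : Int))) =
          List.drop idx.toNat text.toList := by
        rw [PySem.Chars.slice_eq_listSlice, PySem.List.slice_to _ (Int.natCast_nonneg S.length),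
          Int.toNat_natCast, hSlen, List.take_length]
      rw [hA]
    | some q =>
      have hfold := hcore.1 q hscan
      simp only [PySem.Chars.len_eq]
      rw [← hSlen]
      rw [hfold]
      have hA : PySem.Chars.slice (List.drop idx.toNat text.toList) none (some ((q : Int))) =
          List.take q (List.drop idx.toNat text.toList) := by
        rw [PySem.Chars.slice_eq_listSlice, PySem.List.slice_to _ (Int.natCast_nonneg q),
          Int.toNat_natCast]
      have hB : PySem.Chars.slice text.toList (some idx) (some (idx + (q : Int))) =
          List.take q (List.drop idx.toNat text.toList) := by
        rw [PySem.Chars.slice_eq_listSlice,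
          PySem.List.slice_toNat _ hidx0 (by omega : (0:Int) ≤ idx + (q:Int))]
        rw [show ((idx + (q:Int)).toNat - idx.toNat) = q from by omega]
      rw [hA, hB]
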